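-- pv_equiv track=rewrite | github.com/981377660LMT/algorithm-study | 0_数组/摆动数组/Half Monotonous String-枚举每种字符.py | solve
-- ===== SOURCE A (Python) =====
-- from collections import Counter
-- import string
--
-- def solve(s):
--     n = len(s)
--     left = Counter(s[: n // 2])
--     right = Counter(s[n // 2 :])
--     res = n
--
--     for char in string.ascii_lowercase:
--         # all equal
--         res = min(res, n - left[char] - right[char])
--
--         # left <= char < right
--         ok = sum(left[c] for c in left if c <= char)
--         ok += sum(right[c] for c in right if c > char)
--         res = min(res, n - ok)
--
--         # right <= char < left
--         ok = sum(left[c] for c in left if c > char)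
--         ok += sum(right[c] for c in right if c <= char)
--         res = min(res, n - ok)
--
--     return res
-- ===== SOURCE B (Python) =====
-- def solve(s):
--     n = len(s)
--     half = n // 2
--
--     def tally(part):
--         cnt = [0] * 128
--         for ch in part:
--             cnt[ord(ch)] += 1
--         return cnt
--
--     def prefix(cnt):
--         out = []
--         acc = 0
--         for x in cnt:
--             acc += x
--             out.append(acc)
--         return out
--
--     leftLE = prefix(tally(s[:half]))
--     rightLE = prefix(tally(s[half:]))
--     totL, totR = half, n - half
--
--     res = n
--     for c in range(97, 123):
--         eq = leftLE[c] - leftLE[c - 1] + rightLE[c] - rightLE[c - 1]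
--         res = min(res, n - eq,
--                   n - (leftLE[c] + (totR - rightLE[c])),
--                   n - ((totL - leftLE[c]) + rightLE[c]))
--     return res
-- ===== Notes on version B (the rewrite author's own statement) =====
-- stated objective: alternative
-- what changed: Replaces the two Counters and the per-letter re-summation of their entries by two 128-entry cumulative count tables (count of chars with code <= c) built once, so each letter's three candidate costs become O(1) table lookups.
import Mathlib
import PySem

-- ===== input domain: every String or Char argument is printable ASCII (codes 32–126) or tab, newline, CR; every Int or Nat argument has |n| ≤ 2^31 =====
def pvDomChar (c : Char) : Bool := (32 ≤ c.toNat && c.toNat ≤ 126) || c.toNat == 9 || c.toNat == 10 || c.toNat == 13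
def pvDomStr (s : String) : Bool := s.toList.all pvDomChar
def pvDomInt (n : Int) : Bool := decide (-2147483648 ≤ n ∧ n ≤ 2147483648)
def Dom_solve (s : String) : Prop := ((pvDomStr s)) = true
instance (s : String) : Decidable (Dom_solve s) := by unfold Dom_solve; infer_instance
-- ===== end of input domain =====

-- B replaces A's per-letter re-summation of two Counters by two 128-entry cumulative
-- count tables built once (an alternative decomposition of similar cost).

-- ===== PORT A =====
def solve (s : String) : Int :=
  let n : Int := PySem.Str.len s
  let left := PySem.Dict.counter (PySem.List.slice s.toList none (some (PySem.Int.floordiv n 2)))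
  let right := PySem.Dict.counter (PySem.List.slice s.toList (some (PySem.Int.floordiv n 2)) none)
  "abcdefghijklmnopqrstuvwxyz".toList.foldl (fun res char =>
    let res := min res (n - left.getD char 0 - right.getD char 0)
    let ok := ((left.items.filter (fun p => decide (p.1 ≤ char))).map (fun p => p.2)).sum
    let ok := ok + ((right.items.filter (fun p => decide (char < p.1))).map (fun p => p.2)).sum
    let res := min res (n - ok)
    let ok2 := ((left.items.filter (fun p => decide (char < p.1))).map (fun p => p.2)).sum
    let ok2 := ok2 + ((right.items.filter (fun p => decide (p.1 ≤ char))).map (fun p => p.2)).sum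
    min res (n - ok2)) n

-- ===== PORT B =====
-- cnt[ord(ch)] += 1 over a 128-slot table; exact for codes < 128 (every char of Dom)
def tallyB (part : List Char) : List Int :=
  part.foldl (fun cnt ch => cnt.set ch.toNat (cnt.getD ch.toNat 0 + 1)) (List.replicate 128 0)

-- running prefix sums: out[i] = cnt[0] + ... + cnt[i]
def prefixB (cnt : List Int) : List Int :=
  (cnt.foldl (fun (p : List Int × Int) x => (p.1 ++ [p.2 + x], p.2 + x)) ([], 0)).1

def solve_alt (s : String) : Int :=
  let n : Int := PySem.Str.len s
  let half := PySem.Int.floordiv n 2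
  let leftLE := prefixB (tallyB (PySem.List.slice s.toList none (some half)))
  let rightLE := prefixB (tallyB (PySem.List.slice s.toList (some half) none))
  let totL := half
  let totR := n - half
  (PySem.List.pyRange 97 123 1).foldl (fun res c =>
    let eqc := PySem.List.pyGetD leftLE c 0 - PySem.List.pyGetD leftLE (c - 1) 0 +
               PySem.List.pyGetD rightLE c 0 - PySem.List.pyGetD rightLE (c - 1) 0
    min (min (min res (n - eqc))
        (n - (PySem.List.pyGetD leftLE c 0 + (totR - PySem.List.pyGetD rightLE c 0))))
        (n - ((totL - PySem.List.pyGetD leftLE c 0) + PySem.List.pyGetD rightLE c 0))) n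

-- ===== PRECONDITION & SPEC =====
def Spec_solve (s : String) (out : Int) : Prop := out = solve_alt s
instance (s : String) (out : Int) : Decidable (Spec_solve s out) := by unfold Spec_solve; infer_instance

-- ===== CLAIM (what is proved, stated in full; the proofs are below) =====
def Claim_equal_solve : Prop := ∀ (s : String), Dom_solve s → Spec_solve s (solve s)

-- ===== LEMMAS AND PROOFS =====

lemma sum_map_natCast (xs : List Char) (f : Char → ℕ) :
    (xs.map (fun k => ((f k : ℕ) : Int))).sum = ((xs.map f).sum : Int) := by
  rw [Nat.cast_list_sum, List.map_map]; rfl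

lemma sum_counts_eq_countP (l : List Char) (p : Char → Bool) :
    ((((PySem.Dict.counter l).items).filter (fun q => p q.1)).map (fun q => q.2)).sum
      = ((l.countP p : ℕ) : Int) := by
  rw [PySem.Dict.items_counter, List.filter_map, List.map_map]
  have hfe : ((fun (q : Char × Int) => p q.1) ∘ fun k => (k, ((List.count k l : ℕ) : Int)))
      = fun k => p k := by funext k; rfl
  rw [hfe]
  have hfe2 : ((fun (q : Char × Int) => q.2) ∘ fun k => (k, ((List.count k l : ℕ) : Int)))
      = fun k => ((List.count k l : ℕ) : Int) := by funext k; rfl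
  rw [hfe2, sum_map_natCast]
  congr 1
  have hperm : ((PySem.Set.ofList l).filter p).Perm (l.dedup.filter p) :=
    List.Perm.filter p (List.perm_of_nodup_nodup_toFinset_eq (PySem.Set.nodup_ofList l)
      l.nodup_dedup (by ext x; simp [PySem.Set.mem_ofList, List.mem_dedup]))
  rw [List.Perm.sum_eq (List.Perm.map _ hperm)]
  exact List.sum_map_count_dedup_filter_eq_countP p l

lemma tally_aux_length (l : List Char) (A : List Int) :
    (l.foldl (fun cnt ch => cnt.set ch.toNat (cnt.getD ch.toNat 0 + 1)) A).length = A.length := by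
  induction l generalizing A with
  | nil => rfl
  | cons c t ih => simp only [List.foldl_cons]; rw [ih]; exact List.length_set ..

lemma tally_aux_getD (l : List Char) (A : List Int) (i : ℕ) (hi : i < A.length) :
    (l.foldl (fun cnt ch => cnt.set ch.toNat (cnt.getD ch.toNat 0 + 1)) A).getD i 0
      = A.getD i 0 + ((l.countP (fun c => decide (c.toNat = i)) : ℕ) : Int) := by
  induction l generalizing A with
  | nil => simp
  | cons c t ih =>
    simp only [List.foldl_cons, List.countP_cons]
    rw [ih _ (by rw [List.length_set]; exact hi)]
    have hset : (A.set c.toNat (A.getD c.toNat 0 + 1)).getD i 0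
        = A.getD i 0 + if c.toNat = i then 1 else 0 := by
      rw [List.getD_eq_getElem?_getD, List.getElem?_set, List.getD_eq_getElem?_getD]
      by_cases h : c.toNat = i
      · subst h
        simp [hi, List.getD_eq_getElem?_getD]
      · simp [h]
    rw [hset]
    by_cases h : c.toNat = i <;> simp [h] <;> push_cast <;> ring

lemma tallyB_length (l : List Char) : (tallyB l).length = 128 := by
  unfold tallyB; rw [tally_aux_length]; simp

lemma tallyB_getD (l : List Char) (i : ℕ) (hi : i < 128) :
    (tallyB l).getD i 0 = ((l.countP (fun c => decide (c.toNat = i)) : ℕ) : Int) := by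
  unfold tallyB
  rw [tally_aux_getD l _ i (by simpa using hi)]
  have h0 : (List.replicate 128 (0:Int)).getD i 0 = 0 := by
    rw [List.getD_eq_getElem?_getD, List.getElem?_replicate]
    split <;> rfl
  rw [h0, zero_add]

lemma prefix_aux (L : List Int) (out : List Int) (acc : Int) :
    L.foldl (fun (p : List Int × Int) x => (p.1 ++ [p.2 + x], p.2 + x)) (out, acc)
      = (out ++ (List.range L.length).map (fun i => acc + ((L.take (i+1)).sum)), acc + L.sum) := by
  induction L generalizing out acc with
  | nil => simp
  | cons x t ih =>
    simp only [List.foldl_cons]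
    rw [ih]
    refine Prod.ext ?_ (by simp [add_assoc])
    simp only [List.length_cons, List.range_succ_eq_map, List.map_cons, List.map_map]
    simp [Function.comp, List.append_assoc, add_assoc]

lemma prefixB_eq (L : List Int) :
    prefixB L = (List.range L.length).map (fun i => (L.take (i+1)).sum) := by
  unfold prefixB; rw [prefix_aux]; simp

lemma sum_take_succ_getD (L : List Int) (i : ℕ) (h : i < L.length) :
    (L.take (i+1)).sum = (L.take i).sum + L.getD i 0 := by
  rw [List.sum_take_succ L i h, List.getD_eq_getElem _ _ h]

lemma countP_le_succ (l : List Char) (i : ℕ) :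
    l.countP (fun c => decide (c.toNat ≤ i + 1))
      = l.countP (fun c => decide (c.toNat ≤ i)) + l.countP (fun c => decide (c.toNat = i + 1)) := by
  induction l with
  | nil => simp
  | cons c t ih =>
    simp only [List.countP_cons, ih]
    by_cases h1 : c.toNat ≤ i + 1 <;> by_cases h2 : c.toNat ≤ i <;>
      by_cases h3 : c.toNat = i + 1 <;> simp [h1, h2, h3] <;> omega

lemma takeSum (l : List Char) (i : ℕ) (hi : i < 128) :
    ((tallyB l).take (i+1)).sum = ((l.countP (fun c => decide (c.toNat ≤ i)) : ℕ) : Int) := by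
  induction i with
  | zero =>
    rw [sum_take_succ_getD _ 0 (by rw [tallyB_length]; omega), tallyB_getD l 0 (by omega)]
    simp only [List.take_zero, List.sum_nil, zero_add]
    norm_cast
    exact List.countP_congr (fun x _ => by simp)
  | succ k ih =>
    rw [sum_take_succ_getD _ (k+1) (by rw [tallyB_length]; omega), ih (by omega),
        tallyB_getD l (k+1) hi, countP_le_succ]
    push_cast; ring

lemma lookupLE (l : List Char) (c : Int) (h0 : 0 ≤ c) (h1 : c < 128) :
    PySem.List.pyGetD (prefixB (tallyB l)) c 0
      = ((l.countP (fun ch => decide (ch.toNat ≤ c.toNat)) : ℕ) : Int) := by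
  have hlen : (prefixB (tallyB l)).length = 128 := by
    rw [prefixB_eq]; simp [tallyB_length]
  have hc : c.toNat < 128 := by omega
  have hcl : c.toNat < (prefixB (tallyB l)).length := by rw [hlen]; exact hc
  rw [PySem.List.pyGetD_eq_getElem _ _ h0 (by rw [hlen]; push_cast; omega)]
  rw [List.getElem_eq_iff hcl]
  have hq : (prefixB (tallyB l))[c.toNat]? = some (((tallyB l).take (c.toNat+1)).sum) := by
    rw [prefixB_eq]
    simp [tallyB_length, hc]
  rw [hq, takeSum l c.toNat hc]

lemma char_le_iff (a b : Char) : a ≤ b ↔ a.toNat ≤ b.toNat := by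
  rw [Char.le_def, UInt32.le_iff_toNat_le]; rfl

lemma count_eq_countP_toNat (l : List Char) (ch : Char) :
    l.count ch = l.countP (fun c => decide (c.toNat = ch.toNat)) := by
  rw [List.count_eq_countP]
  refine List.countP_congr (fun x _ => ?_)
  simp only [beq_iff_eq, decide_eq_true_eq]
  constructor
  · rintro rfl; rfl
  · intro h; exact Char.ofNat_toNat x ▸ Char.ofNat_toNat ch ▸ congrArg Char.ofNat h

lemma countP_le_char (l : List Char) (ch : Char) :
    l.countP (fun c => decide (c ≤ ch)) = l.countP (fun c => decide (c.toNat ≤ ch.toNat)) :=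
  List.countP_congr (fun x _ => by simpa using char_le_iff x ch)

lemma countP_gt_char (l : List Char) (ch : Char) :
    (l.countP (fun c => decide (ch < c)) : ℕ)
      = l.length - l.countP (fun c => decide (c.toNat ≤ ch.toNat)) := by
  rw [← countP_le_char]
  have h := List.length_eq_countP_add_countP (fun c => decide (c ≤ ch)) (l := l)
  have he : l.countP (fun c => decide ¬(decide (c ≤ ch) = true)) = l.countP (fun c => decide (ch < c)) :=
    List.countP_congr (fun x _ => by simp [not_le])
  omega

set_option maxRecDepth 10000 in
lemma pyRange_letters :
    PySem.List.pyRange 97 123 1 = "abcdefghijklmnopqrstuvwxyz".toList.map (fun ch => (ch.toNat : Int)) := by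
  decide

lemma letters_lit : "abcdefghijklmnopqrstuvwxyz".toList = ['a','b','c','d','e','f','g','h','i','j','k','l','m','n','o','p','q','r','s','t','u','v','w','x','y','z'] := rfl

set_option maxRecDepth 4000 in
lemma letters_bounds_bool : (['a','b','c','d','e','f','g','h','i','j','k','l','m','n','o','p','q','r','s','t','u','v','w','x','y','z'] : List Char).all (fun ch => 97 ≤ ch.toNat && ch.toNat ≤ 122) = true := by
  decide

lemma letters_bounds : ∀ ch ∈ "abcdefghijklmnopqrstuvwxyz".toList, 97 ≤ ch.toNat ∧ ch.toNat ≤ 122 := by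
  have h := letters_bounds_bool
  rw [List.all_eq_true] at h
  intro ch hch
  rw [letters_lit] at hch
  simpa using h ch hch

lemma loop_eq (l r : List Char) (n : Int) :
    List.foldl (fun res char =>
      min (min (min res (n - (PySem.Dict.counter l).getD char 0 - (PySem.Dict.counter r).getD char 0))
        (n - ((((PySem.Dict.counter l).items.filter (fun p => decide (p.1 ≤ char))).map (fun p => p.2)).sum
             + (((PySem.Dict.counter r).items.filter (fun p => decide (char < p.1))).map (fun p => p.2)).sum)))
        (n - ((((PySem.Dict.counter l).items.filter (fun p => decide (char < p.1))).map (fun p => p.2)).sum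
             + (((PySem.Dict.counter r).items.filter (fun p => decide (p.1 ≤ char))).map (fun p => p.2)).sum)))
      n "abcdefghijklmnopqrstuvwxyz".toList
    = List.foldl (fun res c =>
      min (min (min res (n - (PySem.List.pyGetD (prefixB (tallyB l)) c 0 - PySem.List.pyGetD (prefixB (tallyB l)) (c-1) 0 +
                 PySem.List.pyGetD (prefixB (tallyB r)) c 0 - PySem.List.pyGetD (prefixB (tallyB r)) (c-1) 0)))
          (n - (PySem.List.pyGetD (prefixB (tallyB l)) c 0 + ((r.length : Int) - PySem.List.pyGetD (prefixB (tallyB r)) c 0))))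
          (n - (((l.length : Int) - PySem.List.pyGetD (prefixB (tallyB l)) c 0) + PySem.List.pyGetD (prefixB (tallyB r)) c 0)))
      n (PySem.List.pyRange 97 123 1) := by
  rw [pyRange_letters, List.foldl_map]
  refine (PySem.List.foldl_congr_mem _ _ _ _ (fun acc ch hch => ?_)).symm
  obtain ⟨hb1, hb2⟩ := letters_bounds ch hch
  have hm1 : ((ch.toNat : Int) - 1) = ((ch.toNat - 1 : ℕ) : Int) := by omega
  have hLc := lookupLE l (ch.toNat : Int) (by omega) (by omega)
  have hRc := lookupLE r (ch.toNat : Int) (by omega) (by omega)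
  have hLc1 := lookupLE l ((ch.toNat : Int) - 1) (by omega) (by omega)
  have hRc1 := lookupLE r ((ch.toNat : Int) - 1) (by omega) (by omega)
  rw [Int.toNat_natCast] at hLc hRc
  rw [hm1, Int.toNat_natCast] at hLc1 hRc1
  have hsplit_l := countP_le_succ l (ch.toNat - 1)
  have hsplit_r := countP_le_succ r (ch.toNat - 1)
  rw [Nat.sub_add_cancel (by omega)] at hsplit_l hsplit_r
  have hcnt_l := count_eq_countP_toNat l ch
  have hcnt_r := count_eq_countP_toNat r ch
  have hgt_l := countP_gt_char l ch
  have hgt_r := countP_gt_char r ch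
  have hle_l := countP_le_char l ch
  have hle_r := countP_le_char r ch
  have hlen_l : l.countP (fun c => decide (c.toNat ≤ ch.toNat)) ≤ l.length := List.countP_le_length
  have hlen_r : r.countP (fun c => decide (c.toNat ≤ ch.toNat)) ≤ r.length := List.countP_le_length
  rw [hm1, hLc, hRc, hLc1, hRc1,
      PySem.Dict.getD_counter, PySem.Dict.getD_counter,
      sum_counts_eq_countP l (fun x => decide (x ≤ ch)),
      sum_counts_eq_countP r (fun x => decide (ch < x)),
      sum_counts_eq_countP l (fun x => decide (ch < x)),
      sum_counts_eq_countP r (fun x => decide (x ≤ ch))]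
  have e1 : n - ((l.count ch : ℕ) : Int) - ((r.count ch : ℕ) : Int)
      = n - (((l.countP (fun c => decide (c.toNat ≤ ch.toNat)) : ℕ) : Int)
             - ((l.countP (fun c => decide (c.toNat ≤ ch.toNat - 1)) : ℕ) : Int)
             + ((r.countP (fun c => decide (c.toNat ≤ ch.toNat)) : ℕ) : Int)
             - ((r.countP (fun c => decide (c.toNat ≤ ch.toNat - 1)) : ℕ) : Int)) := by
    omega
  have e2 : n - (((l.countP (fun x => decide (x ≤ ch)) : ℕ) : Int)
             + ((r.countP (fun x => decide (ch < x)) : ℕ) : Int))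
      = n - (((l.countP (fun c => decide (c.toNat ≤ ch.toNat)) : ℕ) : Int)
             + (((r.length : ℕ) : Int) - ((r.countP (fun c => decide (c.toNat ≤ ch.toNat)) : ℕ) : Int))) := by
    omega
  have e3 : n - (((l.countP (fun x => decide (ch < x)) : ℕ) : Int)
             + ((r.countP (fun x => decide (x ≤ ch)) : ℕ) : Int))
      = n - ((((l.length : ℕ) : Int) - ((l.countP (fun c => decide (c.toNat ≤ ch.toNat)) : ℕ) : Int))
             + ((r.countP (fun c => decide (c.toNat ≤ ch.toNat)) : ℕ) : Int)) := by
    omega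
  rw [e1, e2, e3]

-- ===== VERDICT (by name: the statement is the Claim_ definition above) =====
theorem solve_spec : Claim_equal_solve := by
  intro s _
  unfold Spec_solve
  show solve s = solve_alt s
  unfold solve solve_alt
  have hfd : PySem.Int.floordiv ((s.toList.length : ℕ) : Int) 2 = ((s.toList.length / 2 : ℕ) : Int) := by
    rw [PySem.Int.floordiv_eq_ediv_of_pos (by norm_num)]
    omega
  have hsl1 : PySem.List.slice s.toList none (some ((s.toList.length / 2 : ℕ) : Int))
      = s.toList.take (s.toList.length / 2) := by
    rw [PySem.List.slice_to _ (by positivity)]; congr 1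
  have hsl2 : PySem.List.slice s.toList (some ((s.toList.length / 2 : ℕ) : Int)) none
      = s.toList.drop (s.toList.length / 2) := by
    rw [PySem.List.slice_from _ (by positivity)]; congr 1
  simp only [PySem.Str.len_eq, hfd, hsl1, hsl2]
  rw [loop_eq (s.toList.take (s.toList.length / 2)) (s.toList.drop (s.toList.length / 2)) (s.toList.length : Int)]
  have h1 : (((s.toList.take (s.toList.length / 2)).length : ℕ) : Int) = ((s.toList.length / 2 : ℕ) : Int) := by
    simp [List.length_take]; omega
  have h2 : (((s.toList.drop (s.toList.length / 2)).length : ℕ) : Int)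
      = ((s.toList.length : ℕ) : Int) - ((s.toList.length / 2 : ℕ) : Int) := by
    simp [List.length_drop]; omega
  simp only [h1, h2]
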